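-- pv_equiv track=rewrite | github.com/r1nlaw/Python-for-data-analysis | contest_02/02.py | count_polypeptide_chains
-- ===== SOURCE A (Python) =====
-- def count_polypeptide_chains(rna_sequence):
--     stop_codons = {'UAA', 'UAG', 'UGA'}
--     chains = []
--     current_chain = []
--
--     i = 0
--     while i < len(rna_sequence):
--         codon = rna_sequence[i:i+3]
--         if codon in stop_codons:
--             if current_chain:
--                 chains.append(len(current_chain))
--                 current_chain = []
--             else:
--                 chains.append(0)
--         else:
--             current_chain.extend(codon)
--         i += 3
--
--     return chains
-- ===== SOURCE B (Python) =====
-- def count_polypeptide_chains(rna_sequence):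
--     codons = [rna_sequence[i:i+3] for i in range(0, len(rna_sequence), 3)]
--     stops = [j for j, c in enumerate(codons) if c in ('UAA', 'UAG', 'UGA')]
--     chains = []
--     prev = -1
--     for j in stops:
--         chains.append(3 * (j - prev - 1))
--         prev = j
--     return chains
-- ===== Notes on version B (the rewrite author's own statement) =====
-- stated objective: alternative
-- what changed: B builds the codon list, collects the indices of the stop codons, and emits each chain length as 3x the gap between consecutive stop indices, instead of threading a growing character accumulator through the codon scan.
import Mathlib
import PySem

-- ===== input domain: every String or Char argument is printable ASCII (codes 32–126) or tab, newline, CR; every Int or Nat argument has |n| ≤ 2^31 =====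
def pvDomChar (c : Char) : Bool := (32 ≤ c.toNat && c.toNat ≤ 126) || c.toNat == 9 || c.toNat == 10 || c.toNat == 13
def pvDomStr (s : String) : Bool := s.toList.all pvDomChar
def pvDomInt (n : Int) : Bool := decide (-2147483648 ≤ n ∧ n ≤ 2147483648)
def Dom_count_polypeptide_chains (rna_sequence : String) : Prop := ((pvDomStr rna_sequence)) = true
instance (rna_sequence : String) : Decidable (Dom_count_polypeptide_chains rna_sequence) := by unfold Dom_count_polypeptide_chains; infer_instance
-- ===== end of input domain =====

-- B indexes the stop codons first and emits chain lengths as 3×(index gaps), instead of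
-- threading a growing char accumulator through the scan; objective: simpler decomposition.

-- ===== PORT A =====
-- stop_codons = {'UAA', 'UAG', 'UGA'}  (a set of three literals; membership test)
def pvStopCodons : List (List Char) := ["UAA".toList, "UAG".toList, "UGA".toList]

-- the while loop: i steps by 3; state = (chains, current_chain)
def pvA_loop (cs : List Char) (i : Nat) (chains : List Int) (cur : List Char) : List Int :=
  if i < cs.length then
    let codon := PySem.List.slice cs (some (i : Int)) (some ((i : Int) + 3))
    if codon ∈ pvStopCodons then
      if cur ≠ [] then pvA_loop cs (i + 3) (chains ++ [(cur.length : Int)]) []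
      else pvA_loop cs (i + 3) (chains ++ [(0 : Int)]) []
    else pvA_loop cs (i + 3) chains (cur ++ codon)
  else chains
termination_by cs.length - i

def count_polypeptide_chains (rna_sequence : String) : List Int :=
  pvA_loop rna_sequence.toList 0 [] []

-- ===== PORT B =====
-- codons = [rna[i:i+3] for i in range(0, len(rna), 3)]; stops = indices of stop codons;
-- then walk stops with prev = -1 emitting 3*(j - prev - 1)
def count_polypeptide_chains_alt (rna_sequence : String) : List Int :=
  let cs := rna_sequence.toList
  let codons := (PySem.List.pyRange 0 (cs.length : Int) 3).map
      (fun i => PySem.List.slice cs (some i) (some (i + 3)))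
  let stops := (PySem.List.enumerate codons).filterMap
      (fun jc => if jc.2 ∈ pvStopCodons then some jc.1 else none)
  (stops.foldl (fun (st : List Int × Int) j => (st.1 ++ [3 * (j - st.2 - 1)], j)) ([], -1)).1

-- ===== PRECONDITION & SPEC =====
def Spec_count_polypeptide_chains (rna_sequence : String) (out : List Int) : Prop := out = count_polypeptide_chains_alt rna_sequence
instance (rna_sequence : String) (out : List Int) : Decidable (Spec_count_polypeptide_chains rna_sequence out) := by unfold Spec_count_polypeptide_chains; infer_instance

-- ===== CLAIM (what is proved, stated in full; the proofs are below) =====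
def Claim_equal_count_polypeptide_chains : Prop := ∀ (rna_sequence : String), Dom_count_polypeptide_chains rna_sequence → Spec_count_polypeptide_chains rna_sequence (count_polypeptide_chains rna_sequence)

-- ===== LEMMAS AND PROOFS =====

-- the chunk-of-3 list both programs traverse
def pvCodons (cs : List Char) (i : Nat) : List (List Char) :=
  if i < cs.length then
    PySem.List.slice cs (some (i : Int)) (some ((i : Int) + 3)) :: pvCodons cs (i + 3)
  else []
termination_by cs.length - i

-- A's behaviour on a codon list, with acc = length of the current chain
def pvG (L : List (List Char)) (acc : Int) : List Int :=
  match L with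
  | [] => []
  | c :: rest => if c ∈ pvStopCodons then acc :: pvG rest 0 else pvG rest (acc + c.length)

-- B's stop-index list and gap walk, as plain recursions
def pvStopIdx (L : List (List Char)) (s : Int) : List Int :=
  match L with
  | [] => []
  | c :: rest => if c ∈ pvStopCodons then s :: pvStopIdx rest (s + 1) else pvStopIdx rest (s + 1)

def pvGap (stops : List Int) (prev : Int) : List Int :=
  match stops with
  | [] => []
  | j :: rest => 3 * (j - prev - 1) :: pvGap rest j

theorem pvA_loop_eq (cs : List Char) (i : Nat) (chains : List Int) (cur : List Char) :
    pvA_loop cs i chains cur = chains ++ pvG (pvCodons cs i) (cur.length : Int) := by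
  induction i, chains, cur using pvA_loop.induct cs with
  | case1 i chains cur h codon hstop hne ih =>
    rw [pvA_loop, pvCodons]
    simp only [if_pos h, if_pos hne, pvG, ih]
    have hs : PySem.List.slice cs (some (i : Int)) (some ((i : Int) + 3)) ∈ pvStopCodons := hstop
    simp [hs]
  | case2 i chains cur h codon hstop hne ih =>
    rw [pvA_loop, pvCodons]
    have hcur : cur = [] := by simpa using hne
    subst hcur
    simp only [if_pos h, if_neg hne, pvG, ih]
    have hs : PySem.List.slice cs (some (i : Int)) (some ((i : Int) + 3)) ∈ pvStopCodons := hstop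
    simp [hs]
  | case3 i chains cur h codon hstop ih =>
    rw [pvA_loop, pvCodons]
    simp only [if_pos h, pvG]
    have hs : PySem.List.slice cs (some (i : Int)) (some ((i : Int) + 3)) ∉ pvStopCodons := hstop
    have ih' : pvA_loop cs (i + 3) chains
        (cur ++ PySem.List.slice cs (some (i : Int)) (some ((i : Int) + 3))) =
        chains ++ pvG (pvCodons cs (i + 3))
          ((cur ++ PySem.List.slice cs (some (i : Int)) (some ((i : Int) + 3))).length : Int) := ih
    rw [if_neg hs, ih']
    simp [hs, List.length_append]
  | case4 i chains cur h =>
    rw [pvA_loop, pvCodons]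
    simp [h, pvG]

theorem pvRange3_nil (a b : Int) (h : ¬ a < b) : PySem.List.pyRange a b 3 = [] := by
  rw [PySem.List.pyRange_of_pos a b (by norm_num)]
  simp [h]

theorem pvRange3_cons (a b : Int) (h : a < b) :
    PySem.List.pyRange a b 3 = a :: PySem.List.pyRange (a + 3) b 3 := by
  rw [PySem.List.pyRange_of_pos a b (by norm_num),
      PySem.List.pyRange_of_pos (a + 3) b (by norm_num)]
  by_cases h3 : a + 3 < b
  · rw [if_pos h, if_pos h3]
    have hn : ((b - a + 3 - 1) / 3).toNat = ((b - (a + 3) + 3 - 1) / 3).toNat + 1 := by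
      omega
    rw [hn, List.range_succ_eq_map, List.map_cons, List.map_map]
    refine congrArg₂ _ (by simp) ?_
    apply List.map_congr_left
    intro k _
    simp only [Function.comp]
    push_cast
    ring
  · rw [if_pos h, if_neg h3]
    have hn : ((b - a + 3 - 1) / 3).toNat = 1 := by omega
    rw [hn]
    simp

theorem pvCodons_eq (cs : List Char) (i : Nat) :
    (PySem.List.pyRange (i : Int) (cs.length : Int) 3).map
        (fun j => PySem.List.slice cs (some j) (some (j + 3))) = pvCodons cs i := by
  induction i using pvCodons.induct cs with
  | case1 i h ih =>
    rw [pvCodons]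
    have hlt : (i : Int) < (cs.length : Int) := by exact_mod_cast h
    rw [pvRange3_cons _ _ hlt, List.map_cons, if_pos h]
    refine congrArg₂ _ rfl ?_
    have : (i : Int) + 3 = ((i + 3 : Nat) : Int) := by push_cast; ring
    rw [this, ih]
  | case2 i h =>
    rw [pvCodons]
    have : ¬ (i : Int) < (cs.length : Int) := by exact_mod_cast h
    rw [pvRange3_nil _ _ this, if_neg h]
    simp

theorem pvStopIdx_eq (L : List (List Char)) (s : Int) :
    (PySem.List.enumerate L s).filterMap
        (fun jc => if jc.2 ∈ pvStopCodons then some jc.1 else none) = pvStopIdx L s := by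
  induction L generalizing s with
  | nil => simp [pvStopIdx, PySem.List.enumerate_nil]
  | cons c rest ih =>
    rw [PySem.List.enumerate_cons, pvStopIdx]
    by_cases hc : c ∈ pvStopCodons
    · simp [hc, ih]
    · simp [hc, ih]

theorem pvFoldl_gap (stops : List Int) (chains : List Int) (prev : Int) :
    (stops.foldl (fun (st : List Int × Int) j => (st.1 ++ [3 * (j - st.2 - 1)], j))
        (chains, prev)).1 = chains ++ pvGap stops prev := by
  induction stops generalizing chains prev with
  | nil => simp [pvGap]
  | cons j rest ih => simp [pvGap, ih]

theorem pvCodons_ne_nil (cs : List Char) (i : Nat) :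
    pvCodons cs i ≠ [] ↔ i < cs.length := by
  rw [pvCodons]
  by_cases h : i < cs.length <;> simp [h]

theorem pvCodons_dropLast_length (cs : List Char) (i : Nat) :
    ∀ c ∈ (pvCodons cs i).dropLast, c.length = 3 := by
  induction i using pvCodons.induct cs with
  | case1 i h ih =>
    rw [pvCodons, if_pos h]
    by_cases htail : pvCodons cs (i + 3) = []
    · rw [htail]
      simp
    · rw [List.dropLast_cons_of_ne_nil htail]
      intro c hc
      rcases List.mem_cons.mp hc with hc | hc
      · subst hc
        have h3 : i + 3 < cs.length := (pvCodons_ne_nil cs (i + 3)).mp htail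
        have hcast : (i : Int) + 3 = (i : Int) + ((3 : Nat) : Int) := by norm_cast
        rw [hcast, PySem.List.slice_natCast_add]
        simp
        omega
      · exact ih c hc
  | case2 i h =>
    rw [pvCodons, if_neg h]
    simp

theorem pvGap_eq_pvG (L : List (List Char)) :
    ∀ (s prev acc : Int), (∀ c ∈ L.dropLast, c.length = 3) → acc = 3 * (s - prev - 1) →
      pvGap (pvStopIdx L s) prev = pvG L acc := by
  induction L with
  | nil => intro s prev acc _ _; simp [pvStopIdx, pvGap, pvG]
  | cons c rest ih =>
    intro s prev acc hlen hacc
    have hrest : ∀ c' ∈ rest.dropLast, c'.length = 3 := by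
      intro c' hc'
      apply hlen
      cases rest with
      | nil => simp at hc'
      | cons d ds =>
        rw [List.dropLast_cons_of_ne_nil (by simp)]
        exact List.mem_cons_of_mem _ hc'
    rw [pvStopIdx, pvG]
    by_cases hc : c ∈ pvStopCodons
    · rw [if_pos hc, if_pos hc, pvGap]
      rw [← hacc]
      refine congrArg₂ _ rfl ?_
      exact ih (s + 1) s 0 hrest (by ring)
    · rw [if_neg hc, if_neg hc]
      cases rest with
      | nil => simp [pvStopIdx, pvGap, pvG]
      | cons d ds =>
        have hc3 : c.length = 3 := by
          apply hlen
          rw [List.dropLast_cons_of_ne_nil (by simp)]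
          exact List.mem_cons_self
        exact ih (s + 1) prev (acc + c.length) hrest (by rw [hc3, hacc]; push_cast; ring)

-- ===== VERDICT (by name: the statement is the Claim_ definition above) =====
theorem count_polypeptide_chains_spec : Claim_equal_count_polypeptide_chains := by
  intro rna _
  unfold Spec_count_polypeptide_chains count_polypeptide_chains
  simp only [count_polypeptide_chains_alt]
  rw [pvA_loop_eq]
  rw [show (0 : Int) = ((0 : Nat) : Int) from rfl, pvCodons_eq, pvStopIdx_eq, pvFoldl_gap]
  simp only [List.nil_append, List.length_nil, Nat.cast_zero]
  symm
  exact pvGap_eq_pvG _ 0 (-1) 0 (pvCodons_dropLast_length _ 0) (by ring)
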